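-- pv_equiv track=rewrite | github.com/broadinstitute/single_cell_portal | scripts/genomes/utils.py | get_pool_args
-- ===== SOURCE A (Python) =====
-- def chunkify(lst, n):
--     """Chunk a big list into smaller lists, each of length n
--     """
--     return [lst[i::n] for i in range(n)]
--
-- def get_pool_args(urls, output_dir, num_cores):
--     """Gets chunked URL and output path arguments for multicore fetch
--     """
--
--     url_and_output_paths = []
--     output_paths = [output_dir + url.split('/')[-1] for url in urls]
--     for i, url in enumerate(urls):
--         url_and_output_paths.append([url, output_paths[i]])
--
--     if num_cores < len(url_and_output_paths):
--         num_chunks = num_cores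
--     else:
--         num_chunks = len(url_and_output_paths)
--     chunked_url_and_output_paths = chunkify(url_and_output_paths, num_chunks)
--
--     return chunked_url_and_output_paths
-- ===== SOURCE B (Python) =====
-- def get_pool_args(urls, output_dir, num_cores):
--     """Gets chunked URL and output path arguments for multicore fetch"""
--     pairs = [[url, output_dir + url.split('/')[-1]] for url in urls]
--     num_chunks = min(num_cores, len(pairs))
--     if num_chunks <= 0:
--         return []
--     buckets = [[] for _ in range(num_chunks)]
--     for idx, pair in enumerate(pairs):
--         buckets[idx % num_chunks].append(pair)
--     return buckets
-- ===== Notes on version B (the rewrite author's own statement) =====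
-- stated objective: alternative
-- what changed: The strided-slice chunkify (one slice lst[i::n] per chunk) is replaced by a single round-robin pass that appends each pair to bucket idx % num_chunks, with an explicit early return of [] when num_chunks <= 0.
import Mathlib
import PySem

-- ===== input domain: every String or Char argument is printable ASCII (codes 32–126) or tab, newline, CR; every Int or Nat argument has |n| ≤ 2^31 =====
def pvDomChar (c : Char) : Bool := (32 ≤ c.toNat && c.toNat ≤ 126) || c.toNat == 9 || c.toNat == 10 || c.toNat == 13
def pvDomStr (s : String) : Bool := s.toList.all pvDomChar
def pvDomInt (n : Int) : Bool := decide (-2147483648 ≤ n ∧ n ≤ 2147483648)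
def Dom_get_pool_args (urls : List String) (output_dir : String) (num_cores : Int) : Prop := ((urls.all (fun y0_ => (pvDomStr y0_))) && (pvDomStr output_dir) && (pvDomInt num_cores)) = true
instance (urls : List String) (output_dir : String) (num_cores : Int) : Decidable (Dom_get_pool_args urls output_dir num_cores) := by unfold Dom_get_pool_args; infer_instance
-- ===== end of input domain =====

-- B replaces the strided-slice chunkify of A with a single round-robin pass over the pairs; same return value, no speed claim.

-- ===== PORT A =====
-- output_dir + url.split('/')[-1]: split never returns an empty list, so the [-1] and the getD defaults are never reached.
def pyBasename (output_dir url : String) : String :=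
  output_dir ++ PySem.List.pyGetD ((PySem.Str.split? url "/").getD []) (-1) ""

-- chunkify(lst, n) = [lst[i::n] for i in range(n)]; inside range(n) the step n is never 0, so the getD [] is never reached.
def chunkifyA {α : Type} (lst : List α) (n : Int) : List (List α) :=
  (PySem.List.pyRange 0 n 1).map (fun i => (PySem.List.slice? lst (some i) none n).getD [])

def get_pool_args (urls : List String) (output_dir : String) (num_cores : Int) : List (List (List String)) :=
  let output_paths := urls.map (fun url => pyBasename output_dir url)
  let url_and_output_paths :=
    (PySem.List.enumerate urls).foldl
      (fun acc p => acc ++ [[p.2, PySem.List.pyGetD output_paths p.1 ""]]) []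
  let num_chunks :=
    if num_cores < PySem.List.len url_and_output_paths then num_cores
    else PySem.List.len url_and_output_paths
  chunkifyA url_and_output_paths num_chunks

-- ===== PORT B =====
-- round-robin: bucket idx % num_chunks receives pair idx; 'if num_chunks <= 0: return []' as in Source B
def get_pool_args_alt (urls : List String) (output_dir : String) (num_cores : Int) : List (List (List String)) :=
  let pairs := urls.map (fun url => [url, pyBasename output_dir url])
  let num_chunks := min num_cores (PySem.List.len pairs)
  if num_chunks ≤ 0 then []
  else
    (PySem.List.enumerate pairs).foldl
      (fun bks p =>
        PySem.List.pySetD bks (PySem.Int.mod p.1 num_chunks)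
          (PySem.List.pyGetD bks (PySem.Int.mod p.1 num_chunks) [] ++ [p.2]))
      (List.replicate num_chunks.toNat [])

-- ===== PRECONDITION & SPEC =====
def Spec_get_pool_args (urls : List String) (output_dir : String) (num_cores : Int) (out : List (List (List String))) : Prop := out = get_pool_args_alt urls output_dir num_cores
instance (urls : List String) (output_dir : String) (num_cores : Int) (out : List (List (List String))) : Decidable (Spec_get_pool_args urls output_dir num_cores out) := by unfold Spec_get_pool_args; infer_instance

-- ===== CLAIM (what is proved, stated in full; the proofs are below) =====
def Claim_equal_get_pool_args : Prop := ∀ (urls : List String) (output_dir : String) (num_cores : Int), Dom_get_pool_args urls output_dir num_cores → Spec_get_pool_args urls output_dir num_cores (get_pool_args urls output_dir num_cores)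

-- ===== LEMMAS AND PROOFS =====

-- elements of L at offsets k (counted from start index s) with (s+k) % m = j, in order
def canon {α : Type} (m j : Nat) (L : List α) (s : Nat) : List α :=
  ((PySem.List.enumerate L (s : Int)).filter
      (fun p => PySem.Int.mod p.1 (m : Int) == (j : Int))).map (·.2)

theorem canon_cons {α : Type} (m j s : Nat) (x : α) (xs : List α) :
    canon m j (x :: xs) s =
      (if s % m = j then [x] else []) ++ canon m j xs (s + 1) := by
  have hc : ((s : Int) + 1) = ((s + 1 : Nat) : Int) := by push_cast; ring
  simp only [canon, PySem.List.enumerate_cons, List.filter_cons, hc, PySem.Int.mod_natCast]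
  have hcond : ((((s % m : Nat) : Int)) == ((j : Nat) : Int)) = (s % m == j) := by simp; omega
  rw [hcond]
  by_cases h : s % m = j <;> simp [h]

theorem canon_nil {α : Type} (m j s : Nat) : canon (α := α) m j [] s = [] := by
  simp [canon, PySem.List.enumerate]

theorem canon_shift {α : Type} (m j : Nat) (L : List α) (s : Nat) :
    canon m j L (s + m) = canon m j L s := by
  induction L generalizing s with
  | nil => simp [canon, PySem.List.enumerate]
  | cons x xs ih =>
    rw [canon_cons, canon_cons, Nat.add_mod_right]
    have : s + m + 1 = (s + 1) + m := by omega
    rw [this, ih (s + 1)]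

theorem canon_append {α : Type} (m j : Nat) (A B : List α) (s : Nat) :
    canon m j (A ++ B) s = canon m j A s ++ canon m j B (s + A.length) := by
  induction A generalizing s with
  | nil => simp [canon]
  | cons x xs ih =>
    simp only [List.cons_append, canon_cons, ih (s + 1), List.length_cons, List.append_assoc]
    congr 3
    omega

theorem canon_short {α : Type} (m j : Nat) (hj : j < m) (xs : List α) (s : Nat)
    (h : s + xs.length ≤ m) :
    canon m j xs s = if s ≤ j then (xs[j - s]?).toList else [] := by
  induction xs generalizing s with
  | nil => simp [canon, PySem.List.enumerate]
  | cons x xs ih =>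
    have hs : s < m := by simp at h; omega
    rw [canon_cons, ih (s + 1) (by simp at h ⊢; omega), Nat.mod_eq_of_lt hs]
    rcases Nat.lt_trichotomy s j with hlt | heq | hgt
    · rw [if_neg (by omega), if_pos (by omega), if_pos (by omega)]
      have hd : j - s = (j - (s + 1)) + 1 := by omega
      simp [hd]
    · subst heq
      rw [if_pos rfl, if_neg (by omega), if_pos le_rfl]
      simp
    · rw [if_neg (by omega), if_neg (by omega), if_neg (by omega)]
      simp

theorem slice_stride_none {α : Type} (m j : Nat) (hm : (0:Int) < m) (L : List α) (h : L.length ≤ j) :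
    PySem.List.slice? L (some (j : Int)) none (m : Int) = some [] := by
  simp only [PySem.List.slice?, PySem.List.sliceIndices]
  rw [if_neg (by omega)]
  simp only [if_neg (by omega : ¬ (m:Int) < 0)]
  rw [if_neg (by omega : ¬ (j:Int) < 0)]
  rw [min_eq_right (by exact_mod_cast h), if_pos hm, if_neg (lt_irrefl _)]
  simp

theorem slice_stride_cons {α : Type} (m j : Nat) (hm : (0:Int) < m) (L : List α) (h : j < L.length) :
    PySem.List.slice? L (some (j : Int)) none (m : Int) =
      some (L[j] :: (PySem.List.slice? (L.drop m) (some (j : Int)) none (m : Int)).getD []) := by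
  simp only [PySem.List.slice?, PySem.List.sliceIndices]
  rw [if_neg (by omega), if_neg (by omega)]
  simp only [if_neg (by omega : ¬ (m:Int) < 0)]
  rw [if_neg (by omega : ¬ (j:Int) < 0)]
  rw [min_eq_left (by exact_mod_cast Nat.le_of_lt h), if_pos hm, if_pos (by exact_mod_cast h)]
  rw [if_neg (by omega : ¬ (m:Int) = 0), if_pos hm]
  simp only [Option.getD_some]
  by_cases hj' : j < (L.drop m).length
  · rw [min_eq_left (by exact_mod_cast Nat.le_of_lt hj'), if_pos (by exact_mod_cast hj')]
    have hlen : (L.drop m).length = L.length - m := List.length_drop ..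
    have hc : ((L.length : Int) - j + m - 1) = (((L.drop m).length : Int) - j + m - 1) + 1 * m := by
      rw [hlen]; omega
    have hcount : (((L.length : Int) - j + m - 1) / m).toNat
        = ((((L.drop m).length : Int) - j + m - 1) / (m:Int)).toNat + 1 := by
      rw [hc, Int.add_mul_ediv_right _ _ (by omega : (m:Int) ≠ 0)]
      have hpos : 0 ≤ (((L.drop m).length : Int) - j + m - 1) / (m:Int) := by
        apply Int.ediv_nonneg <;> omega
      omega
    rw [hcount, List.range_succ_eq_map, List.filterMap_cons]
    have h0 : ((j:Int) + m * (0:Nat)).toNat = j := by omega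
    rw [h0, List.getElem?_eq_getElem h]
    simp only [List.filterMap_map]
    have hfun : ((fun x : Nat => L[((j:Int) + m * x).toNat]?) ∘ Nat.succ)
        = (fun k : Nat => (L.drop m)[((j:Int) + m * k).toNat]?) := by
      funext k
      simp only [Function.comp_apply, List.getElem?_drop]
      congr 1
      push_cast
      ring_nf
      have ht : 0 ≤ (m:Int) * k := by positivity
      omega
    rw [hfun]
  · rw [min_eq_right (by exact_mod_cast Nat.le_of_not_lt hj'), if_neg (lt_irrefl _)]
    have hlen : (L.drop m).length = L.length - m := List.length_drop ..
    have hcount : (((L.length : Int) - j + m - 1) / m).toNat = 1 := by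
      have h1 : ((L.length : Int) - j + m - 1) = ((L.length : Int) - j - 1) + 1 * m := by ring
      rw [h1, Int.add_mul_ediv_right _ _ (by omega : (m:Int) ≠ 0)]
      rw [Int.ediv_eq_zero_of_lt (by omega) (by omega)]
      omega
    rw [hcount]
    have h0 : ((j:Int) + m * (0:Nat)).toNat = j := by omega
    simp [List.range_succ_eq_map, List.getElem?_eq_getElem h]

theorem stride_eq_canon {α : Type} (m j : Nat) (hm : 0 < m) (hj : j < m) (L : List α) :
    (PySem.List.slice? L (some (j : Int)) none (m : Int)).getD [] = canon m j L 0 := by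
  induction hn : L.length using Nat.strong_induction_on generalizing L with
  | _ n ih =>
  by_cases h : j < L.length
  · rw [slice_stride_cons m j (by exact_mod_cast hm) L h]
    have hL : L = L.take m ++ L.drop m := (List.take_append_drop m L).symm
    rw [Option.getD_some]
    conv_rhs => rw [hL]
    rw [canon_append, canon_short m j hj (L.take m) 0 (by simp), List.length_take]
    have hdrop := ih (L.drop m).length (by subst hn; simp; omega) (L.drop m) rfl
    rw [hdrop]
    have htk : (L.take m)[j - 0]? = some L[j] := by
      simp [h, hj]
    rw [if_pos (Nat.zero_le _), htk]
    by_cases hm2 : m ≤ L.length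
    · rw [min_eq_left hm2]
      rw [show (0 + m) = m from by omega] at *
      have := canon_shift m j (L.drop m) 0
      rw [show (0 + m) = m from by omega] at this
      rw [this]
      rfl
    · have hdn : L.drop m = [] := List.drop_eq_nil_of_le (by omega)
      rw [hdn, canon_nil, canon_nil]
      rfl
  · rw [slice_stride_none m j (by exact_mod_cast hm) L (by omega)]
    rw [canon_short m j hj L 0 (by omega), if_pos (Nat.zero_le _)]
    rw [List.getElem?_eq_none_iff.mpr (by omega : L.length ≤ j - 0)]
    rfl

theorem rr_loop {α : Type} (m : Nat) (hm : 0 < m) (L : List α) :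
    ∀ (s : Nat) (Bk : List (List α)), Bk.length = m → ∀ (j : Nat),
      ((PySem.List.enumerate L (s : Int)).foldl
        (fun bks p =>
          PySem.List.pySetD bks (PySem.Int.mod p.1 (m : Int))
            (PySem.List.pyGetD bks (PySem.Int.mod p.1 (m : Int)) [] ++ [p.2])) Bk)[j]? =
      (Bk[j]?).map (· ++ canon m j L s) := by
  induction L with
  | nil =>
    intro s Bk hBk j
    rw [show PySem.List.enumerate ([] : List α) (s : Int) = [] from rfl]
    rw [canon_nil]
    cases h : Bk[j]? <;> simp [h]
  | cons x xs ih =>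
    intro s Bk hBk j
    rw [PySem.List.enumerate_cons]
    simp only [List.foldl_cons]
    have hcast : ((s : Int) + 1) = ((s + 1 : Nat) : Int) := by push_cast; ring
    rw [hcast]
    rw [show (PySem.Int.mod (s : Int) (m : Int)) = ((s % m : Nat) : Int) from PySem.Int.mod_natCast s m]
    simp only [PySem.List.pySetD_natCast, PySem.List.pyGetD_natCast]
    rw [ih (s + 1) _ (by rw [List.length_set]; exact hBk) j]
    rw [canon_cons]
    have htm : s % m < m := Nat.mod_lt s hm
    by_cases hj : s % m = j
    · rw [if_pos hj, hj]
      have hjlen : j < Bk.length := by omega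
      rw [List.getElem?_set_self (by omega), List.getElem?_eq_getElem hjlen]
      rw [List.getD_eq_getElem _ _ hjlen]
      simp
    · rw [if_neg hj, List.getElem?_set_ne hj]
      cases h : Bk[j]? <;> simp

theorem pairs_eq (urls : List String) (output_dir : String) :
    (PySem.List.enumerate urls).foldl
      (fun acc p => acc ++ [[p.2, PySem.List.pyGetD (urls.map (fun url => pyBasename output_dir url)) p.1 ""]]) [] =
    urls.map (fun url => [url, pyBasename output_dir url]) := by
  rw [PySem.List.foldl_append_singleton_eq_map]
  apply List.ext_getElem?
  intro k
  simp only [List.nil_append, List.getElem?_map, PySem.List.getElem?_enumerate]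
  cases h : urls[k]? with
  | none => simp
  | some u =>
    simp only [Option.map_some, zero_add, PySem.List.pyGetD_natCast]
    rw [List.getD_eq_getElem?_getD, List.getElem?_map, h]
    rfl

theorem main_eq (urls : List String) (output_dir : String) (num_cores : Int) :
    get_pool_args urls output_dir num_cores = get_pool_args_alt urls output_dir num_cores := by
  unfold get_pool_args get_pool_args_alt
  simp only [pairs_eq]
  set P := urls.map (fun url => [url, pyBasename output_dir url]) with hP
  have hmin : (if num_cores < PySem.List.len P then num_cores else PySem.List.len P)
      = min num_cores (PySem.List.len P) := by
    split_ifs <;> omega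
  rw [hmin]
  set n := min num_cores (PySem.List.len P) with hn
  by_cases hpos : n ≤ 0
  · rw [if_pos hpos]
    unfold chunkifyA
    rw [PySem.List.pyRange_of_pos 0 n (by omega : (0:Int) < 1)]
    rw [if_neg (by omega : ¬ (0:Int) < n)]
    simp
  · rw [if_neg hpos]
    have hm0 : 0 < n := by omega
    have hlenP : n ≤ PySem.List.len P := by omega
    set m := n.toNat with hmdef
    have hnm : n = (m : Int) := by omega
    have hm : 0 < m := by omega
    have hmlen : (PySem.List.len P) = (P.length : Int) := PySem.List.len_eq P
    rw [hnm]
    unfold chunkifyA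
    apply List.ext_getElem?
    intro k
    have hrr := rr_loop m hm P 0 (List.replicate m []) (by simp) k
    rw [Nat.cast_zero] at hrr
    rw [hrr]
    rw [PySem.List.pyRange_zero_natCast m, List.map_map, List.getElem?_map]
    by_cases hk : k < m
    · rw [List.getElem?_range hk, List.getElem?_replicate, if_pos hk]
      simp only [Option.map_some, Function.comp_apply]
      rw [stride_eq_canon m k hm hk P]
      simp
    · rw [List.getElem?_eq_none_iff.mpr (by simpa using hk), List.getElem?_eq_none_iff.mpr (by simpa using hk)]
      rfl

-- ===== VERDICT (by name: the statement is the Claim_ definition above) =====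
theorem get_pool_args_spec : Claim_equal_get_pool_args := by
  intro urls output_dir num_cores _
  unfold Spec_get_pool_args
  exact main_eq urls output_dir num_cores
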